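-- pv_equiv track=rewrite | github.com/lovehhf/newcoder_py | 笔试题/哔哩哔哩 2019秋招编程题合集/13_翻转链表.py | solve
-- ===== SOURCE A (Python) =====
-- def solve(nums):
--     n = len(nums)
--     l, r = 0, n - 1
--     res = []
--     while l < r:
--         res.append(nums[l])
--         res.append(nums[r])
--         l += 1
--         r -= 1
--     if l == r:
--         res.append(nums[l])
--     return ','.join([str(x) for x in res])
-- ===== SOURCE B (Python) =====
-- def solve(nums):
--     half = len(nums) // 2
--     front = nums[:half]
--     back = nums[::-1][:half]
--     inter = [x for pair in zip(front, back) for x in pair]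
--     if len(nums) % 2:
--         inter.append(nums[half])
--     return ','.join(map(str, inter))
-- ===== Notes on version B (the rewrite author's own statement) =====
-- stated objective: idiomatic
-- what changed: Replaces the two-pointer while loop with explicit index bookkeeping by a slice/zip decomposition: interleave the first half with the reversed last half and append the middle element when the length is odd.
import Mathlib
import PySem

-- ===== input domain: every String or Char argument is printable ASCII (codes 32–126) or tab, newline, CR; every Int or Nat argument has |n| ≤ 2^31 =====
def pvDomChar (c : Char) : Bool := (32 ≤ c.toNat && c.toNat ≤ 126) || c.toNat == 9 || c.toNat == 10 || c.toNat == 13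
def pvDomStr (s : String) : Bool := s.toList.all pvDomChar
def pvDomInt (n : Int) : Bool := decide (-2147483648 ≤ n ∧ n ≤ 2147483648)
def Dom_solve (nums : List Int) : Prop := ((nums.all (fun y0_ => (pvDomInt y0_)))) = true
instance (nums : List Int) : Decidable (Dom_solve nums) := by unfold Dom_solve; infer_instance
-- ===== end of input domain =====

-- B interleaves the first half with the reversed last half via slices and zip instead of A's two-pointer while loop; same cost, more idiomatic.

-- ===== PORT A =====
-- A's while loop; its indices satisfy 0 ≤ l ≤ r < len whenever an element is read, so pyGetD's default is never used and the port is exact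
def solveLoop (nums : List Int) (l r : Int) (res : List Int) : List Int :=
  if l < r then
    solveLoop nums (l + 1) (r - 1)
      ((res ++ [PySem.List.pyGetD nums l 0]) ++ [PySem.List.pyGetD nums r 0])
  else if l = r then res ++ [PySem.List.pyGetD nums l 0]
  else res
termination_by (r - l).toNat
decreasing_by omega

def solve (nums : List Int) : String :=
  PySem.Str.join "," ((solveLoop nums 0 ((nums.length : Int) - 1) []).map PySem.Int.toStr)

-- ===== PORT B =====
def solve_alt (nums : List Int) : String :=
  let half : Nat := nums.length / 2
  let front := nums.take half                 -- nums[:half]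
  let back := nums.reverse.take half          -- nums[::-1][:half]
  let inter0 := (front.zip back).flatMap (fun p => [p.1, p.2])
  let inter1 := if nums.length % 2 ≠ 0 then inter0 ++ [PySem.List.pyGetD nums (half : Int) 0] else inter0
  PySem.Str.join "," (inter1.map PySem.Int.toStr)

-- ===== PRECONDITION & SPEC =====
def Spec_solve (nums : List Int) (out : String) : Prop := out = solve_alt nums
instance (nums : List Int) (out : String) : Decidable (Spec_solve nums out) := by unfold Spec_solve; infer_instance

-- ===== CLAIM (what is proved, stated in full; the proofs are below) =====
def Claim_equal_solve : Prop := ∀ (nums : List Int), Dom_solve nums → Spec_solve nums (solve nums)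

-- ===== LEMMAS AND PROOFS =====

-- reference interleaving, defined from both ends
def inter (xs : List Int) : List Int :=
  List.bidirectionalRec (motive := fun _ => List Int) [] (fun a => [a]) (fun a _ b ih => a :: b :: ih) xs

lemma inter_nil : inter [] = [] := by simp [inter]

lemma inter_singleton (a : Int) : inter [a] = [a] := by simp [inter]

lemma inter_wrap (a b : Int) (ys : List Int) :
    inter (a :: (ys ++ [b])) = a :: b :: inter ys := by simp [inter]

lemma pyGetD_toNat (nums : List Int) (i : Int) (h0 : 0 ≤ i) :
    PySem.List.pyGetD nums i 0 = nums.getD i.toNat 0 := by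
  conv_lhs => rw [← Int.toNat_of_nonneg h0]
  rw [PySem.List.pyGetD_natCast]

lemma take_drop_single (xs : List Int) (i : Nat) (h : i < xs.length) :
    (xs.drop i).take 1 = [xs.getD i 0] := by
  rw [List.getD_eq_getElem?_getD, List.getElem?_eq_getElem h]
  simp only [Option.getD_some]
  rw [List.drop_eq_getElem_cons h]
  rfl

lemma take_drop_decomp (xs : List Int) (i j : Nat) (hij : i < j) (hj : j < xs.length) :
    (xs.drop i).take (j - i + 1) = xs.getD i 0 :: ((xs.drop (i+1)).take (j - 1 - i)) ++ [xs.getD j 0] := by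
  rw [List.getD_eq_getElem?_getD, List.getD_eq_getElem?_getD,
      List.getElem?_eq_getElem (by omega), List.getElem?_eq_getElem hj]
  simp only [Option.getD_some]
  rw [List.drop_eq_getElem_cons (by omega : i < xs.length)]
  rw [show j - i + 1 = (j - 1 - i) + 1 + 1 by omega]
  rw [List.take_succ_cons]
  rw [List.take_add_one]
  rw [List.getElem?_drop]
  rw [show i + 1 + (j - 1 - i) = j by omega]
  rw [List.getElem?_eq_getElem hj]
  simp

-- the segment nums[l : r+1] that A's loop still has to process
def seg (nums : List Int) (l r : Int) : List Int :=
  (nums.drop l.toNat).take (r + 1 - l).toNat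

lemma seg_nil (nums : List Int) (l r : Int) (h : r < l) : seg nums l r = [] := by
  unfold seg
  rw [show (r + 1 - l).toNat = 0 by omega]
  simp

lemma seg_single (nums : List Int) (l : Int) (hl : 0 ≤ l) (hr : l < nums.length) :
    seg nums l l = [nums.getD l.toNat 0] := by
  unfold seg
  rw [show (l + 1 - l).toNat = 1 by omega]
  exact take_drop_single nums l.toNat (by omega)

lemma seg_decomp (nums : List Int) (l r : Int) (hl : 0 ≤ l) (hlr : l < r)
    (hr : r < nums.length) :
    seg nums l r = nums.getD l.toNat 0 :: seg nums (l + 1) (r - 1) ++ [nums.getD r.toNat 0] := by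
  unfold seg
  rw [show (l + 1).toNat = l.toNat + 1 by omega,
      show (r - 1 + 1 - (l + 1)).toNat = r.toNat - 1 - l.toNat by omega,
      show (r + 1 - l).toNat = r.toNat - l.toNat + 1 by omega]
  exact take_drop_decomp nums l.toNat r.toNat (by omega) (by omega)

lemma seg_full (nums : List Int) : seg nums 0 ((nums.length : Int) - 1) = nums := by
  unfold seg
  rw [show ((nums.length : Int) - 1 + 1 - 0).toNat = nums.length by omega]
  simp

lemma loop_spec (nums : List Int) : ∀ (fuel : Nat) (l r : Int) (res : List Int),
    (r - l).toNat ≤ fuel → 0 ≤ l → r < nums.length →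
    solveLoop nums l r res = res ++ inter (seg nums l r) := by
  intro fuel
  induction fuel with
  | zero =>
      intro l r res hf hl hr
      rw [solveLoop, if_neg (by omega : ¬ l < r)]
      by_cases heq : l = r
      · subst heq
        rw [if_pos rfl, pyGetD_toNat nums l hl, seg_single nums l hl hr, inter_singleton]
      · rw [if_neg heq, seg_nil nums l r (by omega), inter_nil, List.append_nil]
  | succ n ih =>
      intro l r res hf hl hr
      rw [solveLoop]
      by_cases hlt : l < r
      · rw [if_pos hlt,
            ih (l + 1) (r - 1) _ (by omega) (by omega) (by omega),
            seg_decomp nums l r hl hlt hr, List.cons_append, inter_wrap,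
            pyGetD_toNat nums l hl, pyGetD_toNat nums r (by omega)]
        simp
      · rw [if_neg hlt]
        by_cases heq : l = r
        · subst heq
          rw [if_pos rfl, pyGetD_toNat nums l hl, seg_single nums l hl hr, inter_singleton]
        · rw [if_neg heq, seg_nil nums l r (by omega), inter_nil, List.append_nil]

-- B's interleaved list, as built by solve_alt
def interB (nums : List Int) : List Int :=
  if nums.length % 2 ≠ 0 then
    ((nums.take (nums.length / 2)).zip (nums.reverse.take (nums.length / 2))).flatMap (fun p => [p.1, p.2])
      ++ [PySem.List.pyGetD nums ((nums.length / 2 : Nat) : Int) 0]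
  else
    ((nums.take (nums.length / 2)).zip (nums.reverse.take (nums.length / 2))).flatMap (fun p => [p.1, p.2])

lemma interB_eq_inter : ∀ (nums : List Int), interB nums = inter nums := by
  intro nums
  induction nums using List.bidirectionalRec with
  | nil => simp [interB, inter]
  | singleton a => simp [interB, inter, PySem.List.pyGetD]
  | cons_append a ys b ih =>
      rw [inter_wrap, ← ih]
      show interB (a :: (ys ++ [b])) = a :: b :: interB ys
      unfold interB
      have hlen : (a :: (ys ++ [b])).length = ys.length + 2 := by simp
      have hhalf : (a :: (ys ++ [b])).length / 2 = ys.length / 2 + 1 := by rw [hlen]; omega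
      have hle : ys.length / 2 ≤ ys.length := Nat.div_le_self _ _
      have htake : (a :: (ys ++ [b])).take ((a :: (ys ++ [b])).length / 2)
          = a :: ys.take (ys.length / 2) := by
        rw [hhalf]
        simp only [List.take_succ_cons]
        exact congrArg _ (List.take_append_of_le_length hle)
      have htake2 : (a :: (ys ++ [b])).reverse.take ((a :: (ys ++ [b])).length / 2)
          = b :: ys.reverse.take (ys.length / 2) := by
        have hrev : (a :: (ys ++ [b])).reverse = b :: (ys.reverse ++ [a]) := by simp
        rw [hrev, hhalf]
        simp only [List.take_succ_cons]
        exact congrArg _ (List.take_append_of_le_length (by simpa using hle))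
      have hmod : (a :: (ys ++ [b])).length % 2 = ys.length % 2 := by rw [hlen]; omega
      rw [htake, htake2, hmod, hhalf]
      by_cases hodd : ys.length % 2 ≠ 0
      · have hlt : ys.length / 2 < ys.length := by omega
        have hmid : PySem.List.pyGetD (a :: (ys ++ [b])) ((ys.length / 2 + 1 : Nat) : Int) 0
            = PySem.List.pyGetD ys ((ys.length / 2 : Nat) : Int) 0 := by
          rw [PySem.List.pyGetD_natCast, PySem.List.pyGetD_natCast]
          simp only [List.getD_eq_getElem?_getD, List.getElem?_cons_succ]
          rw [List.getElem?_append_left hlt]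
        rw [if_pos hodd, hmid]
        simp [interB, hodd]
      · rw [if_neg hodd]
        simp [interB, hodd]

lemma solve_alt_eq (nums : List Int) :
    solve_alt nums = PySem.Str.join "," ((inter nums).map PySem.Int.toStr) := by
  rw [← interB_eq_inter]
  by_cases h : nums.length % 2 ≠ 0 <;>
    simp [solve_alt, interB, h]

-- ===== VERDICT (by name: the statement is the Claim_ definition above) =====
theorem solve_spec : Claim_equal_solve := by
  intro nums _
  unfold Spec_solve solve
  rw [loop_spec nums ((nums.length : Int) - 1 - 0).toNat 0 ((nums.length : Int) - 1) []
        le_rfl (by omega) (by omega),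
      solve_alt_eq, seg_full]
  simp
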